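-- pv_equiv track=rewrite | github.com/FatmaElMahdi1000/Learn-to-Code-by-Solving-Problems-Book | Chapter9/LifeGuards.py | optimization
-- ===== SOURCE A (Python) =====
-- def optimization(intervals, Fired):
--     """
--     Method to take: time intervals, calculating max time units of shift coverage
--     Param:
--         intervals (list)
--         Fired (idex) -> Desired LG to be fired
--     Returns:
--         covered (int): max time units of shift coverage (same output will be copied/written to another file)
--     """
--     covered = set() #set usage as it's gonna rm any duplicates, as LG shifts might overlap
--     intervals_length = len(intervals)
--     for i in range(intervals_length):
--         if i != Fired:
--             interval = intervals[i]
--             for j in range(interval[0], interval[1]):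
--                 covered.add(j)
--     return len(covered)
-- ===== SOURCE B (Python) =====
-- def optimization(intervals, Fired):
--     pairs = sorted(
--         ((iv[0], iv[1]) for i, iv in enumerate(intervals) if i != Fired and iv[0] < iv[1]),
--         key=lambda p: p[0],
--     )
--     total = 0
--     cur = None
--     for a, b in pairs:
--         if cur is None:
--             cur = (a, b)
--         elif a > cur[1]:
--             total += cur[1] - cur[0]
--             cur = (a, b)
--         else:
--             cur = (cur[0], max(cur[1], b))
--     if cur is not None:
--         total += cur[1] - cur[0]
--     return total
-- ===== Notes on version B (the rewrite author's own statement) =====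
-- stated objective: faster
-- what changed: Instead of inserting every individual covered time unit of each kept interval into a set and returning its size, B filters out the fired/empty intervals, sorts the (start,end) pairs by start, merges overlapping intervals in one sweep and sums the merged lengths.
import Mathlib
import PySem

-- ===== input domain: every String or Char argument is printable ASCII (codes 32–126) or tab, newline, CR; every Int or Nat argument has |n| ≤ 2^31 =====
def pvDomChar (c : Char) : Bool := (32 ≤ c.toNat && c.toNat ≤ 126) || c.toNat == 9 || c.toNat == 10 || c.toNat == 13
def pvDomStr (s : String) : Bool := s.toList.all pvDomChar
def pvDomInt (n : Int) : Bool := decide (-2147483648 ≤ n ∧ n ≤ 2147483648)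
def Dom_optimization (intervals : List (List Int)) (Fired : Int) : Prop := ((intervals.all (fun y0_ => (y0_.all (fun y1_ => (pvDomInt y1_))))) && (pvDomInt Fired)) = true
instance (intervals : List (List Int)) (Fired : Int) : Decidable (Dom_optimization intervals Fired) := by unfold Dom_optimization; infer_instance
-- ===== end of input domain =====

-- B replaces A's point-by-point enumeration of every covered time unit with
-- sort-and-merge over the interval endpoints (objective: faster — O(n log n)
-- instead of O(sum of interval lengths)).

-- ===== PORT A =====
-- Python's 'covered' set is consumed only via .add and len(), never iterated,
-- so it is ported as a Std.TreeSet Int (exact; a list-based set would not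
-- evaluate on million-point intervals).
def optimization (intervals : List (List Int)) (Fired : Int) : Int :=
  let covered : Std.TreeSet Int compare :=
    (PySem.List.pyRange 0 (PySem.List.len intervals) 1).foldl
      (fun covered i =>
        if i ≠ Fired then
          let interval := PySem.List.pyGetD intervals i []
          (PySem.List.pyRange (PySem.List.pyGetD interval 0 0)
              (PySem.List.pyGetD interval 1 0) 1).foldl (fun c j => c.insert j) covered
        else covered)
      Std.TreeSet.empty
  (covered.size : Int)

-- ===== PORT B =====
-- the merge sweep of Source B: state = (current merged interval or None, running total)
def mergeLoop : List (Int × Int) → Option (Int × Int) → Int → Int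
  | [], none, total => total
  | [], some c, total => total + (c.2 - c.1)
  | p :: rest, none, total => mergeLoop rest (some p) total
  | p :: rest, some c, total =>
      if c.2 < p.1 then mergeLoop rest (some p) (total + (c.2 - c.1))
      else mergeLoop rest (some (c.1, max c.2 p.2)) total

def optimization_alt (intervals : List (List Int)) (Fired : Int) : Int :=
  let pairs : List (Int × Int) :=
    ((PySem.List.enumerate intervals).filter (fun p =>
        p.1 != Fired && decide (PySem.List.pyGetD p.2 0 0 < PySem.List.pyGetD p.2 1 0))).map
      (fun p => (PySem.List.pyGetD p.2 0 0, PySem.List.pyGetD p.2 1 0))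
  mergeLoop (PySem.List.sorted pairs (fun p => p.1)) none 0

-- ===== PRECONDITION & SPEC =====
-- Pre_ excludes exactly the inputs on which Python A raises IndexError: some
-- kept interval (index ≠ Fired) has fewer than 2 elements.  B raises there too.
def Pre_optimization (intervals : List (List Int)) (Fired : Int) : Prop :=
  ∀ p ∈ PySem.List.enumerate intervals, p.1 ≠ Fired → 2 ≤ p.2.length
instance (intervals : List (List Int)) (Fired : Int) : Decidable (Pre_optimization intervals Fired) := by unfold Pre_optimization; infer_instance

def pvWitness_optimization : List (List Int) × Int := ([[1, 3], [2, 5], [9, 7]], 5)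

def Spec_optimization (intervals : List (List Int)) (Fired : Int) (out : Int) : Prop := out = optimization_alt intervals Fired
instance (intervals : List (List Int)) (Fired : Int) (out : Int) : Decidable (Spec_optimization intervals Fired out) := by unfold Spec_optimization; infer_instance

-- ===== CLAIM (what is proved, stated in full; the proofs are below) =====
def Claim_equal_optimization : Prop := ∀ (intervals : List (List Int)) (Fired : Int), Dom_optimization intervals Fired → Pre_optimization intervals Fired → Spec_optimization intervals Fired (optimization intervals Fired)

-- ===== LEMMAS AND PROOFS =====

-- the union of the half-open intervals of a pair list, as a Finset
def icoUnion (ps : List (Int × Int)) : Finset Int :=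
  (ps.foldr (fun p acc => PySem.List.pyRange p.1 p.2 1 ++ acc) []).toFinset

theorem icoUnion_cons (p : Int × Int) (rest : List (Int × Int)) :
    icoUnion (p :: rest) = Finset.Ico p.1 p.2 ∪ icoUnion rest := by
  ext x
  simp [icoUnion, PySem.List.mem_pyRange_one, Finset.mem_Ico]

theorem mem_icoUnion (ps : List (Int × Int)) (x : Int) :
    x ∈ icoUnion ps ↔ ∃ p ∈ ps, p.1 ≤ x ∧ x < p.2 := by
  induction ps with
  | nil => simp [icoUnion]
  | cons p rest ih =>
      rw [icoUnion_cons]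
      simp only [Finset.mem_union, Finset.mem_Ico, ih, List.mem_cons]
      constructor
      · rintro (h | ⟨q, hq, h1, h2⟩)
        · exact ⟨p, Or.inl rfl, h⟩
        · exact ⟨q, Or.inr hq, h1, h2⟩
      · rintro ⟨q, (rfl | hq), h1, h2⟩
        · exact Or.inl ⟨h1, h2⟩
        · exact Or.inr ⟨q, hq, h1, h2⟩

-- the size of a TreeSet is the cardinality of its member Finset
theorem treeSize_eq_card (t : Std.TreeSet Int compare) (S : Finset Int)
    (h : ∀ x, x ∈ t ↔ x ∈ S) : t.size = S.card := by
  have hnd : t.toList.Nodup := by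
    have := Std.TreeSet.distinct_toList (t := t)
    exact this.imp (fun hab => by simpa [compare_eq_iff_eq] using hab)
  have hfin : t.toList.toFinset = S := by
    ext x; rw [List.mem_toFinset, Std.TreeSet.mem_toList, h]
  rw [← Std.TreeSet.length_toList, ← List.toFinset_card_of_nodup hnd, hfin]

theorem mem_foldl_insert (xs : List Int) :
    ∀ (t : Std.TreeSet Int compare) (x : Int),
      x ∈ xs.foldl (fun c j => c.insert j) t ↔ x ∈ t ∨ x ∈ xs := by
  induction xs with
  | nil => simp
  | cons j xs ih =>
      intro t x
      rw [List.foldl_cons, ih, Std.TreeSet.mem_insert, compare_eq_iff_eq, List.mem_cons]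
      tauto

-- A's outer loop body (abbreviation used only in the proofs)
def stepA (intervals : List (List Int)) (Fired : Int) (covered : Std.TreeSet Int compare) (i : Int) : Std.TreeSet Int compare :=
  if i ≠ Fired then
    let interval := PySem.List.pyGetD intervals i []
    (PySem.List.pyRange (PySem.List.pyGetD interval 0 0)
        (PySem.List.pyGetD interval 1 0) 1).foldl (fun c j => c.insert j) covered
  else covered

-- invariant of A's outer fold: the accumulator stays duplicate-free and its
-- members are the start set's members plus the points of the processed intervals
theorem foldA_inv (intervals : List (List Int)) (Fired : Int) (L : List Int) :
    ∀ (s : Std.TreeSet Int compare) (x : Int),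
      x ∈ L.foldl (stepA intervals Fired) s ↔
      x ∈ s ∨ ∃ i ∈ L, i ≠ Fired ∧
        PySem.List.pyGetD (PySem.List.pyGetD intervals i []) 0 0 ≤ x ∧
        x < PySem.List.pyGetD (PySem.List.pyGetD intervals i []) 1 0 := by
  induction L with
  | nil => simp
  | cons i L ih =>
      intro s x
      rw [List.foldl_cons, ih]
      unfold stepA
      by_cases hi : i ≠ Fired
      · simp only [if_pos hi, mem_foldl_insert, PySem.List.mem_pyRange_one]
        constructor
        · rintro ((h | h) | h)
          · exact Or.inl h
          · exact Or.inr ⟨i, by simp, hi, h.1, h.2⟩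
          · obtain ⟨j, hj, hjf, h1, h2⟩ := h
            exact Or.inr ⟨j, by simp [hj], hjf, h1, h2⟩
        · rintro (h | ⟨j, hj, hjf, h1, h2⟩)
          · exact Or.inl (Or.inl h)
          · rcases List.mem_cons.mp hj with rfl | hj
            · exact Or.inl (Or.inr ⟨h1, h2⟩)
            · exact Or.inr ⟨j, hj, hjf, h1, h2⟩
      · simp only [if_neg hi]
        push Not at hi
        subst hi
        constructor
        · rintro (h | ⟨j, hj, hjf, h1, h2⟩)
          · exact Or.inl h
          · exact Or.inr ⟨j, by simp [hj], hjf, h1, h2⟩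
        · rintro (h | ⟨j, hj, hjf, h1, h2⟩)
          · exact Or.inl h
          · rcases List.mem_cons.mp hj with rfl | hj
            · exact absurd rfl hjf
            · exact Or.inr ⟨j, hj, hjf, h1, h2⟩

-- B's pair list (abbreviation used only in the proofs)
def pairsB (intervals : List (List Int)) (Fired : Int) : List (Int × Int) :=
  ((PySem.List.enumerate intervals).filter (fun p =>
      p.1 != Fired && decide (PySem.List.pyGetD p.2 0 0 < PySem.List.pyGetD p.2 1 0))).map
    (fun p => (PySem.List.pyGetD p.2 0 0, PySem.List.pyGetD p.2 1 0))

theorem mem_pairsB (intervals : List (List Int)) (Fired : Int) (q : Int × Int) :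
    q ∈ pairsB intervals Fired ↔
      ∃ i, 0 ≤ i ∧ i < (intervals.length : Int) ∧ i ≠ Fired ∧
        q = (PySem.List.pyGetD (PySem.List.pyGetD intervals i []) 0 0,
             PySem.List.pyGetD (PySem.List.pyGetD intervals i []) 1 0) ∧ q.1 < q.2 := by
  unfold pairsB
  rw [PySem.List.enumerate_eq_map_pyRange intervals []]
  simp only [List.mem_map, List.mem_filter, List.mem_map, PySem.List.mem_pyRange_one,
    PySem.List.len_eq]
  constructor
  · rintro ⟨p, ⟨⟨i, ⟨h0, hn⟩, rfl⟩, hcond⟩, rfl⟩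
    simp only [bne_iff_ne, Bool.and_eq_true, decide_eq_true_eq, ne_eq] at hcond
    exact ⟨i, h0, hn, hcond.1, rfl, hcond.2⟩
  · rintro ⟨i, h0, hn, hif, rfl, hlt⟩
    refine ⟨(i, PySem.List.pyGetD intervals i []), ⟨⟨i, ⟨h0, hn⟩, rfl⟩, ?_⟩, rfl⟩
    simp only [bne_iff_ne, Bool.and_eq_true, decide_eq_true_eq, ne_eq]
    exact ⟨hif, hlt⟩

theorem pairsB_lt (intervals : List (List Int)) (Fired : Int) :
    ∀ q ∈ pairsB intervals Fired, q.1 < q.2 := by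
  intro q hq
  obtain ⟨i, _, _, _, _, h⟩ := (mem_pairsB intervals Fired q).mp hq
  exact h

-- merge-sweep invariant: with a current open interval [s, e) below all
-- remaining starts, the sweep returns total + |[s, e) ∪ (union of the rest)|
theorem mergeLoop_some (ps : List (Int × Int)) :
    ∀ s e total, s < e → (∀ p ∈ ps, s ≤ p.1 ∧ p.1 < p.2) →
      ps.Pairwise (fun p q => p.1 ≤ q.1) →
      mergeLoop ps (some (s, e)) total =
        total + ((Finset.Ico s e ∪ icoUnion ps).card : Int) := by
  induction ps with
  | nil =>
      intro s e total hse _ _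
      simp [mergeLoop, icoUnion, Int.card_Ico, Int.toNat_of_nonneg (by omega : (0:Int) ≤ e - s)]
  | cons p rest ih =>
      intro s e total hse hlo hpw
      have hp := hlo p (List.mem_cons_self ..)
      have hrest : ∀ q ∈ rest, p.1 ≤ q.1 := fun q hq => (List.pairwise_cons.mp hpw).1 q hq
      have hpwr : rest.Pairwise (fun p q => p.1 ≤ q.1) := (List.pairwise_cons.mp hpw).2
      show mergeLoop (p :: rest) (some (s, e)) total = _
      rw [mergeLoop]
      split
      · -- flush: e < p.1
        rename_i hflush
        rw [ih p.1 p.2 _ hp.2 (fun q hq => ⟨hrest q hq, (hlo q (List.mem_cons_of_mem _ hq)).2⟩) hpwr]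
        have hdisj : Disjoint (Finset.Ico s e) (Finset.Ico p.1 p.2 ∪ icoUnion rest) := by
          rw [Finset.disjoint_left]
          intro x hx hx'
          rw [Finset.mem_Ico] at hx
          rcases Finset.mem_union.mp hx' with h | h
          · rw [Finset.mem_Ico] at h; omega
          · obtain ⟨q, hq, h1, _⟩ := (mem_icoUnion rest x).mp h
            have := hrest q hq
            omega
        rw [icoUnion_cons, Finset.card_union_of_disjoint hdisj, Int.card_Ico]
        push_cast
        omega
      · -- extend: p.1 ≤ e
        rename_i hext
        push Not at hext
        rw [ih s (max e p.2) _ (by omega)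
          (fun q hq => ⟨(hlo q (List.mem_cons_of_mem _ hq)).1, (hlo q (List.mem_cons_of_mem _ hq)).2⟩) hpwr]
        have hIco : Finset.Ico s e ∪ Finset.Ico p.1 p.2 = Finset.Ico s (max e p.2) := by
          ext x
          simp only [Finset.mem_union, Finset.mem_Ico]
          omega
        rw [icoUnion_cons, ← Finset.union_assoc, hIco]

theorem mergeLoop_top (ps : List (Int × Int)) (hlt : ∀ p ∈ ps, p.1 < p.2)
    (hpw : ps.Pairwise (fun p q => p.1 ≤ q.1)) :
    mergeLoop ps none 0 = ((icoUnion ps).card : Int) := by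
  cases ps with
  | nil => simp [mergeLoop, icoUnion]
  | cons p rest =>
      show mergeLoop rest (some (p.1, p.2)) 0 = _
      rw [mergeLoop_some rest p.1 p.2 0 (hlt p (List.mem_cons_self ..))
        (fun q hq => ⟨(List.pairwise_cons.mp hpw).1 q hq, hlt q (List.mem_cons_of_mem _ hq)⟩)
        (List.pairwise_cons.mp hpw).2]
      rw [icoUnion_cons]
      omega


-- ===== VERDICT (by name: the statement is the Claim_ definition above) =====
theorem optimization_spec : Claim_equal_optimization := by
  intro intervals Fired _ _
  unfold Spec_optimization
  have hsortmem := fun q => PySem.List.mem_sorted (pairsB intervals Fired) (fun p => p.1) false q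
  have hB : optimization_alt intervals Fired =
      ((icoUnion (PySem.List.sorted (pairsB intervals Fired) (fun p => p.1))).card : Int) := by
    unfold optimization_alt
    exact mergeLoop_top _
      (fun p hp => pairsB_lt intervals Fired p ((hsortmem p).mp hp))
      (PySem.List.sorted_pairwise (pairsB intervals Fired) (fun p => p.1))
  rw [hB]
  -- A's set has exactly the members of B's interval union
  show ((((PySem.List.pyRange 0 (PySem.List.len intervals) 1).foldl
      (stepA intervals Fired) Std.TreeSet.empty).size : Nat) : Int) = _
  congr 1
  apply treeSize_eq_card
  intro x
  rw [foldA_inv, mem_icoUnion]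
  simp only [PySem.List.mem_pyRange_one, Std.TreeSet.empty_eq_emptyc, Std.TreeSet.not_mem_emptyc, false_or,
    PySem.List.len_eq]
  constructor
  · rintro ⟨i, ⟨h0, hn⟩, hif, h1, h2⟩
    refine ⟨(PySem.List.pyGetD (PySem.List.pyGetD intervals i []) 0 0,
             PySem.List.pyGetD (PySem.List.pyGetD intervals i []) 1 0),
            (hsortmem _).mpr ?_, h1, h2⟩
    exact (mem_pairsB intervals Fired _).mpr ⟨i, h0, hn, hif, rfl, by exact lt_of_le_of_lt h1 h2⟩
  · rintro ⟨q, hq, h1, h2⟩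
    obtain ⟨i, h0, hn, hif, rfl, _⟩ := (mem_pairsB intervals Fired q).mp ((hsortmem q).mp hq)
    exact ⟨i, ⟨h0, hn⟩, hif, h1, h2⟩
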